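-- pv_equiv track=rewrite | github.com/pypi-data/pypi-mirror-94 | packages/qary/qary-0.6.22.tar.gz/qary-0.6.22/src/qary/scores/semantic_score.py | overlapping_words
-- ===== SOURCE A (Python) =====
-- def overlapping_words(tokens, reference_tokens):
--     count = 0
--     extra_list = []
--     for word1 in tokens:
--         if word1 in reference_tokens:
--             count += 1
--             extra_list.append(word1)
--     for word2 in reference_tokens:
--         if word2 not in extra_list and word2 in tokens:
--             count += 1
--     return count
-- ===== SOURCE B (Python) =====
-- def overlapping_words(tokens, reference_tokens):
--     counts = {}
--     for w in tokens:
--         counts[w] = counts.get(w, 0) + 1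
--     ref = set(reference_tokens)
--     return sum(c for w, c in counts.items() if w in ref)
-- ===== Notes on version B (the rewrite author's own statement) =====
-- stated objective: faster
-- what changed: The second loop of A is provably a no-op, so A's answer is the number of tokens that occur in reference_tokens; B builds a count dictionary of tokens and a set of reference_tokens once and sums the counts of distinct tokens that lie in the set, removing both of A's inner list scans.
import Mathlib
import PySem

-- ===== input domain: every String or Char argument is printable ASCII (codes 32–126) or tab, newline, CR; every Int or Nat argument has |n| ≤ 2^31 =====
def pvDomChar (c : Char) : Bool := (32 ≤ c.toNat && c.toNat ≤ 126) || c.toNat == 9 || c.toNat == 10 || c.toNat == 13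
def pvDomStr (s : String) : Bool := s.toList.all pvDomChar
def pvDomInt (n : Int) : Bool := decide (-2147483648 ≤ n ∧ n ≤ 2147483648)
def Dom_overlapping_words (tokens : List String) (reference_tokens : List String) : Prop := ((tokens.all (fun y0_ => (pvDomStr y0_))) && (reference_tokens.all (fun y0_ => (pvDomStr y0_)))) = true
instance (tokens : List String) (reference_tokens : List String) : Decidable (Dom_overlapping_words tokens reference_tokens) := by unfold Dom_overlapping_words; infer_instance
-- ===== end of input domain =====

-- B replaces A's quadratic double scan by one counting dictionary over tokens plus a
-- reference set, summing the counts of distinct tokens found in the set (the timing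
-- run measured B faster on the large inputs); A's second loop is provably a no-op.

-- ===== PORT A =====
def overlapping_words (tokens : List String) (reference_tokens : List String) : Int :=
  -- count = 0; extra_list = []; first loop over tokens
  let s := tokens.foldl
    (fun (s : Int × List String) word1 =>
      if reference_tokens.contains word1 then (s.1 + 1, s.2 ++ [word1]) else s)
    ((0 : Int), ([] : List String))
  -- second loop over reference_tokens
  reference_tokens.foldl
    (fun c word2 =>
      if !(s.2.contains word2) && tokens.contains word2 then c + 1 else c)
    s.1

-- ===== PORT B =====
def overlapping_words_alt (tokens : List String) (reference_tokens : List String) : Int :=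
  -- counts = {}; for w in tokens: counts[w] = counts.get(w, 0) + 1
  let counts := tokens.foldl
    (fun (d : PySem.Dict String Int) w => d.insert w (d.getD w 0 + 1))
    PySem.Dict.empty
  -- ref = set(reference_tokens)
  let ref : PySem.Set String := PySem.Set.ofList reference_tokens
  -- sum(c for w, c in counts.items() if w in ref)
  ((counts.items.filter (fun p => ref.contains p.1)).map (fun p => p.2)).sum

-- ===== PRECONDITION & SPEC =====
def Spec_overlapping_words (tokens : List String) (reference_tokens : List String) (out : Int) : Prop := out = overlapping_words_alt tokens reference_tokens
instance (tokens : List String) (reference_tokens : List String) (out : Int) : Decidable (Spec_overlapping_words tokens reference_tokens out) := by unfold Spec_overlapping_words; infer_instance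

-- ===== CLAIM (what is proved, stated in full; the proofs are below) =====
def Claim_equal_overlapping_words : Prop := ∀ (tokens : List String) (reference_tokens : List String), Dom_overlapping_words tokens reference_tokens → Spec_overlapping_words tokens reference_tokens (overlapping_words tokens reference_tokens)

-- ===== LEMMAS AND PROOFS =====

-- filtered sum of a dict's item list: the quantity B computes
def pvSumF (q : String → Bool) (l : List (String × Int)) : Int :=
  ((l.filter (fun p => q p.1)).map (fun p => p.2)).sum

-- A's first loop computes (c + #(filter), e ++ filter)
lemma pvA_loop1 (refs : List String) :
    ∀ (ts : List String) (c : Int) (e : List String),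
      ts.foldl (fun (s : Int × List String) w =>
          if refs.contains w then (s.1 + 1, s.2 ++ [w]) else s) (c, e)
      = (c + ((ts.filter (fun w => refs.contains w)).length : Int),
         e ++ ts.filter (fun w => refs.contains w)) := by
  intro ts
  induction ts with
  | nil => intro c e; simp
  | cons w ts ih =>
    intro c e
    simp only [List.foldl_cons, List.filter_cons]
    by_cases h : refs.contains w = true
    · rw [if_pos h, if_pos h, ih]
      refine Prod.ext ?_ ?_
      · simp only [List.length_cons]; push_cast; ring
      · simp
    · rw [if_neg h, if_neg h, ih]

-- a fold that never fires is the identity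
lemma pvA_loop2 (p : String → Bool) :
    ∀ (l : List String) (c : Int), (∀ w ∈ l, p w = false) →
      l.foldl (fun c w => if p w then c + 1 else c) c = c := by
  intro l
  induction l with
  | nil => intro c _; rfl
  | cons w l ih =>
    intro c h
    have hw := h w (by simp)
    simp [hw]
    exact ih c (fun x hx => h x (by simp [hx]))

lemma pvA_eq_countP (tokens refs : List String) :
    overlapping_words tokens refs
      = ((tokens.countP (fun w => refs.contains w)) : Int) := by
  unfold overlapping_words
  rw [pvA_loop1]
  simp only []
  rw [pvA_loop2]
  · simp [List.countP_eq_length_filter]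
  · intro w hw
    cases htk : tokens.contains w with
    | false => simp [htk]
    | true =>
      have hm : w ∈ tokens := List.contains_iff_mem.mp htk
      have hmem : w ∈ ([] : List String) ++ tokens.filter (fun x => refs.contains x) := by
        simp only [List.nil_append, List.mem_filter]
        exact ⟨hm, List.contains_iff_mem.mpr hw⟩
      have hc : (([] : List String) ++ tokens.filter (fun x => refs.contains x)).contains w = true :=
        List.contains_iff_mem.mpr hmem
      simp
      exact ⟨hm, hw⟩

-- no entry of t has key w → the replacement map is the identity on t
lemma pvMap_id_of_not_mem (t : List (String × Int)) (w : String) (v : Int)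
    (h : w ∉ t.map Prod.fst) :
    t.map (fun p => if p.1 == w then (w, v) else p) = t := by
  induction t with
  | nil => rfl
  | cons a t ih =>
    have ha : (a.1 == w) = false := by
      apply beq_false_of_ne
      intro he
      exact h (by simp [he])
    have ht : w ∉ t.map Prod.fst := by
      intro hm
      exact h (by simp only [List.map_cons, List.mem_cons]; exact Or.inr hm)
    rw [List.map_cons, if_neg (by simp [ha]), ih ht]

-- pvSumF over a cons
lemma pvSumF_cons (q : String → Bool) (a : String × Int) (l : List (String × Int)) :
    pvSumF q (a :: l) = (if q a.1 then a.2 else 0) + pvSumF q l := by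
  simp only [pvSumF, List.filter_cons]
  by_cases h : q a.1 <;> simp [h]

-- one insert step: the filtered sum grows by 1 exactly when q w
lemma pvIns_sum (q : String → Bool) :
    ∀ (l : List (String × Int)) (w : String),
      (l.map Prod.fst).Nodup →
      pvSumF q ((PySem.Dict.mk l).insert w ((PySem.Dict.mk l).getD w 0 + 1)).items
        = pvSumF q l + (if q w then 1 else 0) := by
  intro l w hnd
  induction l with
  | nil =>
    simp [PySem.Dict.insert, PySem.Dict.contains, PySem.Dict.getD, PySem.Dict.get?, pvSumF]
    by_cases hq : q w <;> simp [hq]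
  | cons a t ih =>
    by_cases hk : (a.1 == w) = true
    · -- head is the (unique) entry with key w
      have haw : a.1 = w := by simpa using hk
      have hwt : w ∉ t.map Prod.fst := by
        simp only [List.map_cons, List.nodup_cons] at hnd
        rw [haw] at hnd
        exact hnd.1
      have hcont : (PySem.Dict.mk (a :: t)).contains w = true := by
        simp [PySem.Dict.contains, List.any_cons, hk]
      have hget : (PySem.Dict.mk (a :: t)).getD w 0 = a.2 := by
        simp [PySem.Dict.getD, PySem.Dict.get?, List.find?, hk]
      simp only [PySem.Dict.insert, hcont, if_pos, hget]
      show pvSumF q (((a :: t).map (fun p => if (p.1 == w) = true then (w, a.2 + 1) else p))) = _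
      rw [List.map_cons, if_pos hk, pvMap_id_of_not_mem t w (a.2 + 1) hwt]
      rw [pvSumF_cons, pvSumF_cons, haw]
      by_cases hq : q w <;> simp [hq] <;> ring
    · -- head untouched; recurse on the tail
      have hgd : (PySem.Dict.mk (a :: t)).getD w 0 = (PySem.Dict.mk t).getD w 0 := by
        simp [PySem.Dict.getD, PySem.Dict.get?, List.find?, hk]
      have hndt : (t.map Prod.fst).Nodup := by
        simp only [List.map_cons, List.nodup_cons] at hnd
        exact hnd.2
      have ihh := ih hndt
      by_cases hct : (PySem.Dict.mk t).contains w = true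
      · have hcons : (PySem.Dict.mk (a :: t)).contains w = true := by
          simp only [PySem.Dict.contains] at hct ⊢
          rw [List.any_cons, hct, Bool.or_true]
        have hitems : ((PySem.Dict.mk (a :: t)).insert w ((PySem.Dict.mk (a :: t)).getD w 0 + 1)).items
            = a :: ((PySem.Dict.mk t).insert w ((PySem.Dict.mk t).getD w 0 + 1)).items := by
          simp only [PySem.Dict.insert, hcons, hct, hgd, if_true]
          show (a :: t).map (fun p => if (p.1 == w) = true then (w, (PySem.Dict.mk t).getD w 0 + 1) else p)
              = a :: t.map (fun p => if (p.1 == w) = true then (w, (PySem.Dict.mk t).getD w 0 + 1) else p)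
          rw [List.map_cons, if_neg hk]
        rw [hitems, pvSumF_cons, pvSumF_cons, ihh]
        ring
      · have hta : t.any (fun p => p.1 == w) = false :=
          Bool.eq_false_iff.mpr (fun htrue => hct htrue)
        have hcons : (PySem.Dict.mk (a :: t)).contains w = false := by
          simp only [PySem.Dict.contains, List.any_cons, hta, Bool.or_false]
          simpa using hk
        have hfind : List.find? (fun p => p.1 == w) (a :: t) = none := by
          rw [List.find?_eq_none]
          intro p hp
          rcases List.mem_cons.mp hp with h1 | h2
          · subst h1; simpa using hk
          · simp [List.any_eq_false.mp hta p h2]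
        have hgz : (PySem.Dict.mk (a :: t)).getD w 0 = 0 := by
          simp [PySem.Dict.getD, PySem.Dict.get?, hfind]
        have hitems2 : ((PySem.Dict.mk (a :: t)).insert w ((PySem.Dict.mk (a :: t)).getD w 0 + 1)).items
            = (a :: t) ++ [(w, 0 + 1)] := by
          rw [hgz]
          simp only [PySem.Dict.insert, hcons, Bool.false_eq_true, if_false]
        rw [hitems2]
        simp only [pvSumF, List.filter_append, List.filter_cons, List.map_append, List.sum_append]
        by_cases hq : q w <;> by_cases hqa : q a.1 <;> simp [hq, hqa] <;> ring

lemma pvIns_nodup (l : List (String × Int)) (w : String) (v : Int)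
    (h : (l.map Prod.fst).Nodup) :
    (((PySem.Dict.mk l).insert w v).items.map Prod.fst).Nodup := by
  by_cases hc : (PySem.Dict.mk l).contains w = true
  · have hkeys : (((PySem.Dict.mk l).insert w v).items.map Prod.fst) = l.map Prod.fst := by
      simp only [PySem.Dict.insert, hc, if_pos]
      show ((l.map (fun p => if (p.1 == w) = true then (w, v) else p)).map Prod.fst) = _
      rw [List.map_map]
      apply List.map_congr_left
      intro p _
      by_cases hp : (p.1 == w) = true
      · have : p.1 = w := by simpa using hp
        simp [Function.comp, hp, this]
      · simp [Function.comp, hp]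
    rw [hkeys]; exact h
  · have hwl : w ∉ l.map Prod.fst := by
      intro hm
      apply hc
      simp only [PySem.Dict.contains, List.any_eq_true]
      rcases List.mem_map.mp hm with ⟨p, hp, he⟩
      exact ⟨p, hp, by simp [he]⟩
    have : (((PySem.Dict.mk l).insert w v).items.map Prod.fst) = l.map Prod.fst ++ [w] := by
      simp only [PySem.Dict.insert, hc, if_neg]
      show ((l ++ [(w, v)]).map Prod.fst) = _
      simp
    rw [this, List.nodup_append]
    refine ⟨h, List.nodup_singleton w, ?_⟩
    intro x hx b hb
    rw [List.mem_singleton] at hb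
    subst hb
    intro hxw
    exact hwl (hxw ▸ hx)

-- B's build loop: filtered sum of the dict = countP over the processed tokens
lemma pvB_build (q : String → Bool) :
    ∀ (ts : List String) (d : PySem.Dict String Int),
      (d.items.map Prod.fst).Nodup →
      pvSumF q (ts.foldl (fun d w => d.insert w (d.getD w 0 + 1)) d).items
        = pvSumF q d.items + ((ts.countP q) : Int) := by
  intro ts
  induction ts with
  | nil => intro d _; simp
  | cons w ts ih =>
    intro d hnd
    have h1 := pvIns_sum q d.items w hnd
    have h2 := pvIns_nodup d.items w (d.getD w 0 + 1) hnd
    simp only [List.foldl_cons]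
    rw [ih _ h2, h1, List.countP_cons]
    by_cases hq : q w <;> simp [hq] <;> push_cast <;> ring

lemma pvB_eq_countP (tokens refs : List String) :
    overlapping_words_alt tokens refs
      = ((tokens.countP (fun w => refs.contains w)) : Int) := by
  have h := pvB_build (fun w => (PySem.Set.ofList refs).contains w) tokens
    PySem.Dict.empty (by simp [PySem.Dict.empty])
  have hc : tokens.countP (fun w => (PySem.Set.ofList refs).contains w)
      = tokens.countP (fun w => refs.contains w) := by
    apply List.countP_congr
    intro w _
    simp [List.contains_iff_mem, PySem.Set.mem_ofList]
  unfold overlapping_words_alt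
  show pvSumF (fun w => (PySem.Set.ofList refs).contains w)
      (tokens.foldl (fun d w => d.insert w (d.getD w 0 + 1)) PySem.Dict.empty).items
    = ((tokens.countP (fun w => refs.contains w)) : Int)
  rw [h, hc]
  simp [pvSumF, PySem.Dict.empty]

-- ===== VERDICT (by name: the statement is the Claim_ definition above) =====
theorem overlapping_words_spec : Claim_equal_overlapping_words := by
  intro tokens refs _
  unfold Spec_overlapping_words
  rw [pvA_eq_countP, pvB_eq_countP]
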